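-- pv_equiv track=rewrite | github.com/Vijayalakshmi-2023/Python | Practice_Session3/FeedbackCollector.py | count_sentiments
-- ===== SOURCE A (Python) =====
-- def count_sentiments(feedbacks):
--     counts = {"good": 0, "bad": 0, "average": 0}
--
--     for fb in feedbacks:
--         fb_lower = fb.lower()
--         if "good" in fb_lower:
--             counts["good"] += 1
--         elif "bad" in fb_lower:
--             counts["bad"] += 1
--         elif "average" in fb_lower:
--             counts["average"] += 1
--
--     return counts
-- ===== SOURCE B (Python) =====
-- def count_sentiments(feedbacks):
--     lows = [fb.lower() for fb in feedbacks]
--     good = sum(1 for t in lows if "good" in t)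
--     bad = sum(1 for t in lows if "bad" in t and "good" not in t)
--     average = sum(1 for t in lows
--                   if "average" in t and "good" not in t and "bad" not in t)
--     return {"good": good, "bad": bad, "average": average}
-- ===== Notes on version B (the rewrite author's own statement) =====
-- stated objective: alternative
-- what changed: Replaces the single fused loop with a mutable dict and if/elif chain by three independent counting passes (one per sentiment, with 'not in' guards reproducing the elif priority) assembled into a dict literal.
import Mathlib
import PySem

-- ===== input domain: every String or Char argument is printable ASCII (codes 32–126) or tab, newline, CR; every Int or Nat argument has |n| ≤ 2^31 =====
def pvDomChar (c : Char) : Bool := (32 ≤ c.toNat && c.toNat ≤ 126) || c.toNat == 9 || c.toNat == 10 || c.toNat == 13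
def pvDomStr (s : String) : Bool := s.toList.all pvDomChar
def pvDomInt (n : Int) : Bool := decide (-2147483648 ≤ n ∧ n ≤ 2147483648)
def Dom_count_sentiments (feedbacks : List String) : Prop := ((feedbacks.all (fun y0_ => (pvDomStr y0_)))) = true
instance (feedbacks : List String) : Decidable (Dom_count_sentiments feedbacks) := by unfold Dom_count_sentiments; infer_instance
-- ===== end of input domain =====

-- B replaces A's single fused loop (mutable dict + if/elif chain) by three independent
-- counting passes, one per sentiment, with 'not in' guards reproducing the elif priority.

-- ===== PORT A =====
def count_sentiments (feedbacks : List String) : List (String × Int) :=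
  let counts : PySem.Dict String Int :=
    ((PySem.Dict.empty.insert "good" 0).insert "bad" 0).insert "average" 0
  (feedbacks.foldl (fun counts fb =>
      let fb_lower := PySem.Str.lower fb
      if PySem.Str.isIn "good" fb_lower then counts.modify "good" 0 (· + 1)
      else if PySem.Str.isIn "bad" fb_lower then counts.modify "bad" 0 (· + 1)
      else if PySem.Str.isIn "average" fb_lower then counts.modify "average" 0 (· + 1)
      else counts) counts).items

-- ===== PORT B =====
def count_sentiments_alt (feedbacks : List String) : List (String × Int) :=
  let lows := feedbacks.map PySem.Str.lower
  let good : Int := lows.countP (fun t => PySem.Str.isIn "good" t)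
  let bad : Int := lows.countP (fun t => PySem.Str.isIn "bad" t && !PySem.Str.isIn "good" t)
  let average : Int := lows.countP (fun t =>
      PySem.Str.isIn "average" t && !PySem.Str.isIn "good" t && !PySem.Str.isIn "bad" t)
  [("good", good), ("bad", bad), ("average", average)]

-- ===== PRECONDITION & SPEC =====
def Spec_count_sentiments (feedbacks : List String) (out : List (String × Int)) : Prop := out = count_sentiments_alt feedbacks
instance (feedbacks : List String) (out : List (String × Int)) : Decidable (Spec_count_sentiments feedbacks out) := by unfold Spec_count_sentiments; infer_instance

-- ===== CLAIM (what is proved, stated in full; the proofs are below) =====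
def Claim_equal_count_sentiments : Prop := ∀ (feedbacks : List String), Dom_count_sentiments feedbacks → Spec_count_sentiments feedbacks (count_sentiments feedbacks)

-- ===== LEMMAS AND PROOFS =====

-- A's loop step, named for the proofs (definitionally equal to the lambda in the port).
def pvStep (counts : PySem.Dict String Int) (fb : String) : PySem.Dict String Int :=
  if PySem.Str.isIn "good" (PySem.Str.lower fb) then counts.modify "good" 0 (· + 1)
  else if PySem.Str.isIn "bad" (PySem.Str.lower fb) then counts.modify "bad" 0 (· + 1)
  else if PySem.Str.isIn "average" (PySem.Str.lower fb) then counts.modify "average" 0 (· + 1)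
  else counts

lemma pvFold_keys (l : List String) (d : PySem.Dict String Int)
    (hg : "good" ∈ d.keys) (hb : "bad" ∈ d.keys) (ha : "average" ∈ d.keys) :
    (l.foldl pvStep d).keys = d.keys := by
  induction l generalizing d with
  | nil => rfl
  | cons x l ih =>
    have hstep : (pvStep d x).keys = d.keys := by
      unfold pvStep
      split_ifs <;>
        simp [PySem.Dict.keys_modify, PySem.Dict.keys_insert_of_contains,
          PySem.Dict.contains_iff_mem_keys, hg, hb, ha]
    simp only [List.foldl_cons]
    rw [ih (pvStep d x) (by rw [hstep]; exact hg) (by rw [hstep]; exact hb)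
        (by rw [hstep]; exact ha), hstep]

lemma pvStep_good (d : PySem.Dict String Int) (x : String)
    (h1 : PySem.Str.isIn "good" (PySem.Str.lower x) = true) :
    pvStep d x = d.modify "good" 0 (· + 1) := by
  unfold pvStep; rw [if_pos h1]

lemma pvStep_bad (d : PySem.Dict String Int) (x : String)
    (h1 : PySem.Str.isIn "good" (PySem.Str.lower x) = false)
    (h2 : PySem.Str.isIn "bad" (PySem.Str.lower x) = true) :
    pvStep d x = d.modify "bad" 0 (· + 1) := by
  unfold pvStep; rw [if_neg (by rw [h1]; exact Bool.false_ne_true), if_pos h2]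

lemma pvStep_average (d : PySem.Dict String Int) (x : String)
    (h1 : PySem.Str.isIn "good" (PySem.Str.lower x) = false)
    (h2 : PySem.Str.isIn "bad" (PySem.Str.lower x) = false)
    (h3 : PySem.Str.isIn "average" (PySem.Str.lower x) = true) :
    pvStep d x = d.modify "average" 0 (· + 1) := by
  unfold pvStep; rw [if_neg (by rw [h1]; exact Bool.false_ne_true), if_neg (by rw [h2]; exact Bool.false_ne_true), if_pos h3]

lemma pvStep_none (d : PySem.Dict String Int) (x : String)
    (h1 : PySem.Str.isIn "good" (PySem.Str.lower x) = false)
    (h2 : PySem.Str.isIn "bad" (PySem.Str.lower x) = false)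
    (h3 : PySem.Str.isIn "average" (PySem.Str.lower x) = false) :
    pvStep d x = d := by
  unfold pvStep; rw [if_neg (by rw [h1]; exact Bool.false_ne_true), if_neg (by rw [h2]; exact Bool.false_ne_true), if_neg (by rw [h3]; exact Bool.false_ne_true)]

lemma pv_good_ne_bad : ("good" : String) ≠ "bad" := by decide
lemma pv_good_ne_avg : ("good" : String) ≠ "average" := by decide
lemma pv_bad_ne_avg : ("bad" : String) ≠ "average" := by decide

lemma pvFold_getD_good (l : List String) (d : PySem.Dict String Int) :
    (l.foldl pvStep d).getD "good" 0
      = d.getD "good" 0 + (l.countP (fun t => PySem.Str.isIn "good" (PySem.Str.lower t)) : Int) := by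
  induction l generalizing d with
  | nil => simp
  | cons x l ih =>
    simp only [List.foldl_cons, List.countP_cons]
    rw [ih]
    cases h1 : PySem.Str.isIn "good" (PySem.Str.lower x) with
    | true =>
      rw [pvStep_good d x h1, PySem.Dict.getD_modify_self]
      simp only [if_true]
      push_cast; ring
    | false =>
      have hs : (pvStep d x).getD "good" 0 = d.getD "good" 0 := by
        cases h2 : PySem.Str.isIn "bad" (PySem.Str.lower x) with
        | true => rw [pvStep_bad d x h1 h2, PySem.Dict.getD_modify_of_ne _ _ _ pv_good_ne_bad]
        | false =>
          cases h3 : PySem.Str.isIn "average" (PySem.Str.lower x) with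
          | true => rw [pvStep_average d x h1 h2 h3, PySem.Dict.getD_modify_of_ne _ _ _ pv_good_ne_avg]
          | false => rw [pvStep_none d x h1 h2 h3]
      rw [hs]
      simp

lemma pvFold_getD_bad (l : List String) (d : PySem.Dict String Int) :
    (l.foldl pvStep d).getD "bad" 0
      = d.getD "bad" 0 + (l.countP (fun t => PySem.Str.isIn "bad" (PySem.Str.lower t) && !PySem.Str.isIn "good" (PySem.Str.lower t)) : Int) := by
  induction l generalizing d with
  | nil => simp
  | cons x l ih =>
    simp only [List.foldl_cons, List.countP_cons]
    rw [ih]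
    cases h1 : PySem.Str.isIn "good" (PySem.Str.lower x) with
    | true =>
      rw [pvStep_good d x h1, PySem.Dict.getD_modify_of_ne _ _ _ pv_good_ne_bad.symm]
      simp
    | false =>
      cases h2 : PySem.Str.isIn "bad" (PySem.Str.lower x) with
      | true =>
        rw [pvStep_bad d x h1 h2, PySem.Dict.getD_modify_self]
        simp only [Bool.not_false, Bool.and_true, if_true]
        push_cast; ring
      | false =>
        have hs : (pvStep d x).getD "bad" 0 = d.getD "bad" 0 := by
          cases h3 : PySem.Str.isIn "average" (PySem.Str.lower x) with
          | true => rw [pvStep_average d x h1 h2 h3, PySem.Dict.getD_modify_of_ne _ _ _ pv_bad_ne_avg]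
          | false => rw [pvStep_none d x h1 h2 h3]
        rw [hs]
        simp

lemma pvFold_getD_average (l : List String) (d : PySem.Dict String Int) :
    (l.foldl pvStep d).getD "average" 0
      = d.getD "average" 0 + (l.countP (fun t => PySem.Str.isIn "average" (PySem.Str.lower t) && !PySem.Str.isIn "good" (PySem.Str.lower t) && !PySem.Str.isIn "bad" (PySem.Str.lower t)) : Int) := by
  induction l generalizing d with
  | nil => simp
  | cons x l ih =>
    simp only [List.foldl_cons, List.countP_cons]
    rw [ih]
    cases h1 : PySem.Str.isIn "good" (PySem.Str.lower x) with
    | true =>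
      rw [pvStep_good d x h1, PySem.Dict.getD_modify_of_ne _ _ _ pv_good_ne_avg.symm]
      simp
    | false =>
      cases h2 : PySem.Str.isIn "bad" (PySem.Str.lower x) with
      | true =>
        rw [pvStep_bad d x h1 h2, PySem.Dict.getD_modify_of_ne _ _ _ pv_bad_ne_avg.symm]
        simp
      | false =>
        cases h3 : PySem.Str.isIn "average" (PySem.Str.lower x) with
        | true =>
          rw [pvStep_average d x h1 h2 h3, PySem.Dict.getD_modify_self]
          simp only [Bool.not_false, Bool.and_true, if_true]
          push_cast; ring
        | false =>
          rw [pvStep_none d x h1 h2 h3]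
          simp

-- ===== VERDICT (by name: the statement is the Claim_ definition above) =====
theorem count_sentiments_spec : Claim_equal_count_sentiments := by
  intro feedbacks _
  unfold Spec_count_sentiments count_sentiments count_sentiments_alt
  show (feedbacks.foldl pvStep
      (((PySem.Dict.empty.insert "good" 0).insert "bad" 0).insert "average" 0)).items = _
  set d0 : PySem.Dict String Int :=
    ((PySem.Dict.empty.insert "good" 0).insert "bad" 0).insert "average" 0 with hd0
  have hkeys0 : d0.keys = ["good", "bad", "average"] := by rw [hd0]; rfl
  have hkeys : (feedbacks.foldl pvStep d0).keys = ["good", "bad", "average"] := by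
    rw [pvFold_keys feedbacks d0 (by rw [hkeys0]; simp) (by rw [hkeys0]; simp)
      (by rw [hkeys0]; simp), hkeys0]
  have hnd : (feedbacks.foldl pvStep d0).keys.Nodup := by rw [hkeys]; decide
  rw [PySem.Dict.items_eq_map_keys _ hnd 0, hkeys]
  have hg0 : d0.getD "good" 0 = 0 := by rw [hd0]; rfl
  have hb0 : d0.getD "bad" 0 = 0 := by rw [hd0]; rfl
  have ha0 : d0.getD "average" 0 = 0 := by rw [hd0]; rfl
  simp only [List.map_cons, List.map_nil, pvFold_getD_good, pvFold_getD_bad,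
    pvFold_getD_average, hg0, hb0, ha0, zero_add, List.countP_map, Function.comp_def]
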